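-- pv_equiv track=rewrite | github.com/ruthalemfanta/Medical-Guideline-Assistant | src/answer_generator.py | _find_relevant_quote
-- ===== SOURCE A (Python) =====
-- def _find_relevant_quote(doc_content: str, answer: str) -> str:
--     """Find the most relevant quote from document content."""
--
--     # Simple approach: find sentences that appear in both
--     doc_sentences = doc_content.split('. ')
--     answer_lower = answer.lower()
--
--     for sentence in doc_sentences:
--         if len(sentence) > 50:  # Meaningful sentence
--             # Check if key words from sentence appear in answer
--             sentence_words = set(sentence.lower().split())
--             answer_words = set(answer_lower.split())
--
--             overlap = len(sentence_words.intersection(answer_words))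
--             if overlap >= 3:  # Reasonable overlap
--                 return sentence[:200] + "..." if len(sentence) > 200 else sentence
--
--     # Fallback: return first meaningful sentence
--     for sentence in doc_sentences:
--         if len(sentence) > 50:
--             return sentence[:200] + "..." if len(sentence) > 200 else sentence
--
--     return doc_content[:200] + "..."
-- ===== SOURCE B (Python) =====
-- def _find_relevant_quote(doc_content: str, answer: str) -> str:
--     """Score-and-select: build one scored list (lacks_overlap, position, sentence)
--     over the meaningful sentences, then pick the minimum under tuple order."""
--     answer_words = set(answer.lower().split())
--     scored = [
--         (len(set(s.lower().split()) & answer_words) < 3, i, s)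
--         for i, s in enumerate(doc_content.split('. '))
--         if len(s) > 50
--     ]
--     if not scored:
--         return doc_content[:200] + "..."
--     s = min(scored)[2]
--     return s[:200] + "..." if len(s) > 200 else s
-- ===== Notes on version B (the rewrite author's own statement) =====
-- stated objective: alternative
-- what changed: B replaces A's two sequential early-return scans with a score-and-select formulation: it builds one scored list (lacks_overlap, position, sentence) over the meaningful sentences and picks the result as the minimum of that list under lexicographic tuple order, with the unscored doc-prefix fallback only when the list is empty.
import Mathlib
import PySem

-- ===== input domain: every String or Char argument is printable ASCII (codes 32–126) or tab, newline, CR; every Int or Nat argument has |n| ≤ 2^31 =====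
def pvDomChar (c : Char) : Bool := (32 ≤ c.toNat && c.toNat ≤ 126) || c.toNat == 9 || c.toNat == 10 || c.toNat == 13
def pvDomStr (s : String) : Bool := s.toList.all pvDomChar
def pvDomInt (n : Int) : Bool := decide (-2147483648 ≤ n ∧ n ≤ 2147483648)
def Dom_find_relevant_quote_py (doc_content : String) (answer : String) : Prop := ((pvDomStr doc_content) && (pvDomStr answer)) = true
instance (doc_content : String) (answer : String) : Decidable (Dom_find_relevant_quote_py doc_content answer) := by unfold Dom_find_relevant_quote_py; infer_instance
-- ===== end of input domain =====

-- B replaces A's two early-return scans with a score-and-select formulation (one scored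
-- list over the meaningful sentences, answer = minimum under tuple order); same value.

-- ===== PORT A =====
-- sentence[:200] + "..." if len(sentence) > 200 else sentence
def pvFmt (s : List Char) : List Char :=
  if 200 < s.length then PySem.List.slice s none (some 200) ++ "...".toList else s

-- overlap = len(set(sentence.lower().split()).intersection(answer_words))
def pvOverlap (s : List Char) (aw : PySem.Set (List Char)) : Int :=
  PySem.Set.len (PySem.Set.inter (PySem.Set.ofList (PySem.Chars.split₀ (PySem.Chars.lower s))) aw)

-- first loop of A: first sentence with len > 50 and overlap >= 3, formatted
def pvA_loop1 (al : List Char) : List (List Char) → Option (List Char)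
  | [] => none
  | s :: r =>
    if 50 < s.length then
      if 3 ≤ pvOverlap s (PySem.Set.ofList (PySem.Chars.split₀ al)) then some (pvFmt s)
      else pvA_loop1 al r
    else pvA_loop1 al r

-- second loop of A: first sentence with len > 50, formatted
def pvA_loop2 : List (List Char) → Option (List Char)
  | [] => none
  | s :: r => if 50 < s.length then some (pvFmt s) else pvA_loop2 r

def find_relevant_quote_py (doc_content : String) (answer : String) : String :=
  let sents := PySem.Chars.splitOn doc_content.toList ". ".toList
  let al := PySem.Chars.lower answer.toList
  match pvA_loop1 al sents with
  | some v => String.ofList v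
  | none =>
    match pvA_loop2 sents with
    | some v => String.ofList v
    | none => String.ofList (PySem.List.slice doc_content.toList none (some 200) ++ "...".toList)

-- ===== PORT B =====
-- Python's tuple '<' on the scored triples; within a scored list the (flag, index)
-- pairs are all distinct, so the third component is never compared: exact there.
def pvLt (a b : Bool × Nat × List Char) : Bool :=
  (!a.1 && b.1) || (a.1 == b.1 && decide (a.2.1 < b.2.1))

-- min(scored): first minimal element (ports Python's min on the scored list)
def pvMin1 : List (Bool × Nat × List Char) → Option (Bool × Nat × List Char)
  | [] => none
  | x :: t =>
    match pvMin1 t with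
    | none => some x
    | some m => some (if pvLt m x then m else x)

-- the list comprehension: (overlap < 3, i, s) for meaningful sentences, i = enumerate index
def pvScored (aw : PySem.Set (List Char)) : Nat → List (List Char) → List (Bool × Nat × List Char)
  | _, [] => []
  | i, s :: r =>
    if 50 < s.length then (decide (pvOverlap s aw < 3), i, s) :: pvScored aw (i + 1) r
    else pvScored aw (i + 1) r

def find_relevant_quote_py_alt (doc_content : String) (answer : String) : String :=
  let aw := PySem.Set.ofList (PySem.Chars.split₀ (PySem.Chars.lower answer.toList))
  let scored := pvScored aw 0 (PySem.Chars.splitOn doc_content.toList ". ".toList)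
  match pvMin1 scored with
  | none => String.ofList (PySem.List.slice doc_content.toList none (some 200) ++ "...".toList)
  | some m => String.ofList (pvFmt m.2.2)

-- ===== PRECONDITION & SPEC =====
def Spec_find_relevant_quote_py (doc_content : String) (answer : String) (out : String) : Prop := out = find_relevant_quote_py_alt doc_content answer
instance (doc_content : String) (answer : String) (out : String) : Decidable (Spec_find_relevant_quote_py doc_content answer out) := by unfold Spec_find_relevant_quote_py; infer_instance

-- ===== CLAIM (what is proved, stated in full; the proofs are below) =====
def Claim_equal_find_relevant_quote_py : Prop := ∀ (doc_content : String) (answer : String), Dom_find_relevant_quote_py doc_content answer → Spec_find_relevant_quote_py doc_content answer (find_relevant_quote_py doc_content answer)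

-- ===== LEMMAS AND PROOFS =====

-- characterisation of min over a scored suffix starting at index i
def pvSpec (aw : PySem.Set (List Char)) : Nat → List (List Char) → Option (Bool × Nat × List Char)
  | _, [] => none
  | i, s :: r =>
    if 50 < s.length then
      if pvOverlap s aw < 3 then
        match pvSpec aw (i + 1) r with
        | some m => if m.1 = false then some m else some (true, i, s)
        | none => some (true, i, s)
      else some (false, i, s)
    else pvSpec aw (i + 1) r

theorem pvMin1_scored (aw : PySem.Set (List Char)) (l : List (List Char)) : ∀ i : Nat,
    pvMin1 (pvScored aw i l) = pvSpec aw i l ∧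
      (∀ m, pvSpec aw i l = some m → i ≤ m.2.1) := by
  induction l with
  | nil => intro i; simp [pvScored, pvSpec, pvMin1]
  | cons s r ih =>
    intro i
    obtain ⟨heq, hbd⟩ := ih (i + 1)
    by_cases h50 : 50 < s.length
    · by_cases hov : pvOverlap s aw < 3
      · have hd : (decide (pvOverlap s aw < 3)) = true := by simp [hov]
        constructor
        · simp only [pvScored, pvSpec, h50, hov, if_pos, pvMin1, heq, hd]
          cases hm : pvSpec aw (i + 1) r with
          | none => simp
          | some m =>
            obtain ⟨f, j, t⟩ := m
            have hb : i + 1 ≤ j := hbd _ hm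
            cases f with
            | false => simp [pvLt]
            | true =>
              have hlt : pvLt (true, j, t) (true, i, s) = false := by
                simp [pvLt]; omega
              simp [hlt]
        · intro m hm
          simp only [pvSpec, h50, hov, if_pos] at hm
          cases hs : pvSpec aw (i + 1) r with
          | none =>
            rw [hs] at hm
            simp at hm
            subst hm
            simp
          | some m' =>
            obtain ⟨f, j, t⟩ := m'
            have hb : i + 1 ≤ j := by simpa using hbd _ hs
            rw [hs] at hm
            cases f with
            | false =>
              simp at hm
              subst hm
              simp
              omega
            | true =>
              simp at hm
              subst hm
              simp
      · have hd : (decide (pvOverlap s aw < 3)) = false := by simp [hov]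
        constructor
        · simp only [pvScored, pvSpec, h50, hov, if_pos, if_neg, pvMin1, heq, hd]
          cases hm : pvSpec aw (i + 1) r with
          | none => simp
          | some m =>
            obtain ⟨f, j, t⟩ := m
            have hb : i + 1 ≤ j := hbd _ hm
            have hlt : pvLt (f, j, t) (false, i, s) = false := by
              cases f <;> simp [pvLt] <;> omega
            simp [hlt]
        · intro m hm
          simp only [pvSpec, h50, hov, if_pos, if_neg] at hm
          cases hm; simp
    · constructor
      · simp [pvScored, pvSpec, h50, heq]
      · intro m hm
        simp only [pvSpec, h50, if_neg] at hm
        rw [if_neg (by simpa using h50)] at hm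
        exact Nat.le_of_succ_le (hbd m hm)

-- pvSpec's flag tells which of A's loops produced the sentence
theorem pvSpec_loops (al : List Char) (l : List (List Char)) : ∀ i : Nat,
    (match pvSpec (PySem.Set.ofList (PySem.Chars.split₀ al)) i l with
     | some (false, _, s) => pvA_loop1 al l = some (pvFmt s)
     | some (true, _, s) => pvA_loop1 al l = none ∧ pvA_loop2 l = some (pvFmt s)
     | none => pvA_loop1 al l = none ∧ pvA_loop2 l = none) := by
  induction l with
  | nil => intro i; simp [pvSpec, pvA_loop1, pvA_loop2]
  | cons s r ih =>
    intro i
    have ihr := ih (i + 1)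
    by_cases h50 : 50 < s.length
    · by_cases hov : pvOverlap s (PySem.Set.ofList (PySem.Chars.split₀ al)) < 3
      · have hov' : ¬ 3 ≤ pvOverlap s (PySem.Set.ofList (PySem.Chars.split₀ al)) := by omega
        simp only [pvSpec, h50, hov, if_pos]
        cases hm : pvSpec (PySem.Set.ofList (PySem.Chars.split₀ al)) (i + 1) r with
        | none =>
          rw [hm] at ihr
          simp [pvA_loop1, pvA_loop2, h50, hov', ihr.1]
        | some m =>
          rw [hm] at ihr
          obtain ⟨f, j, t⟩ := m
          cases f with
          | false => simpa [pvA_loop1, h50, hov'] using ihr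
          | true => simp [pvA_loop1, pvA_loop2, h50, hov', ihr.1]
      · have hov' : 3 ≤ pvOverlap s (PySem.Set.ofList (PySem.Chars.split₀ al)) := by omega
        simp [pvSpec, h50, hov, pvA_loop1, hov']
    · simp only [pvSpec, h50, if_neg]
      cases hm : pvSpec (PySem.Set.ofList (PySem.Chars.split₀ al)) (i + 1) r with
      | none =>
        rw [hm] at ihr
        simp [pvA_loop1, pvA_loop2, h50, ihr.1, ihr.2]
      | some m =>
        rw [hm] at ihr
        obtain ⟨f, j, t⟩ := m
        cases f with
        | false => simpa [pvA_loop1, h50] using ihr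
        | true => simp [pvA_loop1, pvA_loop2, h50, ihr.1, ihr.2]

-- ===== VERDICT (by name: the statement is the Claim_ definition above) =====
theorem find_relevant_quote_py_spec : Claim_equal_find_relevant_quote_py := by
  intro doc_content answer _
  unfold Spec_find_relevant_quote_py find_relevant_quote_py find_relevant_quote_py_alt
  simp only []
  set al := PySem.Chars.lower answer.toList with hal
  set sents := PySem.Chars.splitOn doc_content.toList ". ".toList with hsents
  rw [(pvMin1_scored (PySem.Set.ofList (PySem.Chars.split₀ al)) sents 0).1]
  have h := pvSpec_loops al sents 0
  cases hm : pvSpec (PySem.Set.ofList (PySem.Chars.split₀ al)) 0 sents with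
  | none =>
    rw [hm] at h
    simp [h.1, h.2]
  | some m =>
    rw [hm] at h
    obtain ⟨f, j, t⟩ := m
    cases f with
    | false => simp [h]
    | true => simp [h.1, h.2]
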